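-- pv_equiv track=rewrite | github.com/alex-yung-github/AI | Crosswords/crosswords.py | findNeededInfo
-- ===== SOURCE A (Python) =====
-- def findNeededInfo(board):
--     stringboard = ""
--     for i in board.keys():
--         for x in range(len(board[i])):
--             stringboard += board[i][x][0]
--     number = stringboard.count("-")
--     bs = stringboard.count("#")
--     return(number, bs)
-- ===== SOURCE B (Python) =====
-- def findNeededInfo(board):
--     dashes = 0
--     blocks = 0
--     for i in board.keys():
--         for word in board[i]:
--             c = word[0]
--             if c == "-":
--                 dashes += 1
--             elif c == "#":
--                 blocks += 1
--     return (dashes, blocks)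
-- ===== Notes on version B (the rewrite author's own statement) =====
-- stated objective: simpler
-- what changed: B replaces A's build-a-string-of-first-chars-then-scan-it-twice-with-.count by a single pass that iterates each row's words directly and maintains two integer counters.
import Mathlib
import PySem

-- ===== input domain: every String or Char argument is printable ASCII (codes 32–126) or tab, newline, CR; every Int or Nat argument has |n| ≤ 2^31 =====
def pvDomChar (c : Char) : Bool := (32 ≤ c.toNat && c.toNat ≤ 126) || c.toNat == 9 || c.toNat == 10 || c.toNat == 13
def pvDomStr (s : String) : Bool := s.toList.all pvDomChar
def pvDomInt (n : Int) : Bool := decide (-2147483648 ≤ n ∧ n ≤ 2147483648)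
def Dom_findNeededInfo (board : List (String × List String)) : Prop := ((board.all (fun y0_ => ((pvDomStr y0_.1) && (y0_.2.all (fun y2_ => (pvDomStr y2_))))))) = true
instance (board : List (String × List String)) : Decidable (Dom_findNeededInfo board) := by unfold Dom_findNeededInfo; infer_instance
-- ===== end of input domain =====

-- B replaces A's build-a-string-of-first-chars-then-count-twice by one pass with two counters.

-- ===== PORT A =====
-- board[i][x][0]: on an empty word Python raises IndexError (pyGet? = none); Pre_ excludes that, the port pads with ' ' there.
def findNeededInfo (board : List (String × List String)) : Int × Int :=
  let stringboard : List Char := board.foldl (fun sb p =>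
    (PySem.List.pyRange 0 (p.2.length : Int) 1).foldl
      (fun sb2 x => sb2 ++ [(PySem.Str.pyGet? (PySem.List.pyGetD p.2 x "") 0).getD ' ']) sb) []
  ((PySem.Chars.count stringboard ['-'] : Int), (PySem.Chars.count stringboard ['#'] : Int))

-- ===== PORT B =====
-- word[0]: same access as A; the unreached empty-word case (outside Pre_) leaves the counters unchanged.
def findNeededInfo_alt (board : List (String × List String)) : Int × Int :=
  board.foldl (fun acc p =>
    p.2.foldl (fun acc2 word =>
      match PySem.Str.pyGet? word 0 with
      | some c => if c = '-' then (acc2.1 + 1, acc2.2)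
                  else if c = '#' then (acc2.1, acc2.2 + 1)
                  else acc2
      | none => acc2) acc) ((0 : Int), (0 : Int))

-- ===== PRECONDITION & SPEC =====
-- Pre_ excludes boards containing an empty word, on which A's board[i][x][0] raises IndexError.
def Pre_findNeededInfo (board : List (String × List String)) : Prop :=
  ∀ p ∈ board, ∀ s ∈ p.2, s ≠ ""
instance (board : List (String × List String)) : Decidable (Pre_findNeededInfo board) := by unfold Pre_findNeededInfo; infer_instance
def pvWitness_findNeededInfo : (List (String × List String)) := [("a", ["-cat", "#", "dog"]), ("b", ["--"])]
def Spec_findNeededInfo (board : List (String × List String)) (out : Int × Int) : Prop := out = findNeededInfo_alt board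
instance (board : List (String × List String)) (out : Int × Int) : Decidable (Spec_findNeededInfo board out) := by unfold Spec_findNeededInfo; infer_instance

-- ===== CLAIM (what is proved, stated in full; the proofs are below) =====
def Claim_equal_findNeededInfo : Prop := ∀ (board : List (String × List String)), Dom_findNeededInfo board → Pre_findNeededInfo board → Spec_findNeededInfo board (findNeededInfo board)

-- ===== LEMMAS AND PROOFS =====

-- first char of a word, as A's port reads it
def pvFirst (s : String) : Char := (PySem.Str.pyGet? s 0).getD ' '

lemma pyGet?_of_ne_empty (s : String) (h : s ≠ "") :
    PySem.Str.pyGet? s 0 = some (pvFirst s) := by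
  have hl : s.toList ≠ [] := by
    intro hn; exact h (String.toList_inj.mp (by rw [hn]; rfl))
  cases hcs : s.toList with
  | nil => exact absurd hcs hl
  | cons c t => simp [pvFirst, PySem.Chars.pyGet?_eq_listPyGet?, PySem.List.pyGet?, PySem.List.pyIdx?, hcs]

-- Python's s.count(sub) for a one-char sub is List.count
lemma chars_count_go_singleton (c : Char) (s : List Char) (fuel acc : Nat) (h : s.length ≤ fuel) :
    PySem.Chars.count.go [c] fuel s acc = acc + s.count c := by
  induction s generalizing fuel acc with
  | nil => cases fuel <;> simp [PySem.Chars.count.go]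
  | cons x t ih =>
    cases fuel with
    | zero => simp at h
    | succ n =>
      rw [PySem.Chars.count.go]
      by_cases hx : x = c
      · simp [hx, List.isPrefixOf, ih _ _ (by simpa using h)]
        omega
      · simp [List.isPrefixOf, hx, Ne.symm hx, ih _ _ (by simpa using h)]

lemma chars_count_singleton (s : List Char) (c : Char) :
    PySem.Chars.count s [c] = s.count c := by
  simp [PySem.Chars.count, chars_count_go_singleton c s s.length 0 le_rfl]

-- A's stringboard is the flat list of first chars
lemma stringboard_eq (board : List (String × List String)) (sb : List Char) :
    board.foldl (fun sb p =>
      (PySem.List.pyRange 0 (p.2.length : Int) 1).foldl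
        (fun sb2 x => sb2 ++ [(PySem.Str.pyGet? (PySem.List.pyGetD p.2 x "") 0).getD ' ']) sb) sb
    = sb ++ board.flatMap (fun p => p.2.map pvFirst) := by
  induction board generalizing sb with
  | nil => simp
  | cons p bs ih =>
    rw [List.foldl_cons,
      PySem.List.foldl_pyRange_zero_pyGetD' p.2 ""
        (fun sb2 cell => sb2 ++ [(PySem.Str.pyGet? cell 0).getD ' ']) sb,
      PySem.List.foldl_append_singleton_eq_map, ih]
    simp [pvFirst]

-- B's counters accumulate the two counts over one row
lemma alt_row (cells : List String) (h : ∀ s ∈ cells, s ≠ "") (a b : Int) :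
    cells.foldl (fun acc2 word =>
      match PySem.Str.pyGet? word 0 with
      | some c => if c = '-' then (acc2.1 + 1, acc2.2)
                  else if c = '#' then (acc2.1, acc2.2 + 1)
                  else acc2
      | none => acc2) (a, b)
    = (a + ((cells.map pvFirst).count '-' : Int), b + ((cells.map pvFirst).count '#' : Int)) := by
  induction cells generalizing a b with
  | nil => simp
  | cons w t ih =>
    have hw := pyGet?_of_ne_empty w (h w (by simp))
    have ht : ∀ s ∈ t, s ≠ "" := fun s hs => h s (by simp [hs])
    rw [List.foldl_cons, hw]
    by_cases h1 : pvFirst w = '-'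
    · simp only [h1, ih ht]
      simp only [List.map_cons, h1, List.count_cons, Prod.ext_iff]
      constructor <;> push_cast <;> simp <;> omega
    · by_cases h2 : pvFirst w = '#'
      · simp only [h2, ih ht]
        simp only [List.map_cons, h2, List.count_cons, Prod.ext_iff]
        constructor <;> push_cast <;> simp <;> omega
      · simp only [if_neg h1, if_neg h2, ih ht]
        simp only [List.map_cons, List.count_cons, Prod.ext_iff]
        constructor <;> push_cast <;> simp [h1, h2]

-- B's counters accumulate the two counts over the whole board
lemma alt_fold (board : List (String × List String)) (h : ∀ p ∈ board, ∀ s ∈ p.2, s ≠ "") (a b : Int) :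
    board.foldl (fun acc p =>
      p.2.foldl (fun acc2 word =>
        match PySem.Str.pyGet? word 0 with
        | some c => if c = '-' then (acc2.1 + 1, acc2.2)
                    else if c = '#' then (acc2.1, acc2.2 + 1)
                    else acc2
        | none => acc2) acc) (a, b)
    = (a + ((board.flatMap (fun p => p.2.map pvFirst)).count '-' : Int),
       b + ((board.flatMap (fun p => p.2.map pvFirst)).count '#' : Int)) := by
  induction board generalizing a b with
  | nil => simp
  | cons p bs ih =>
    have hp : ∀ s ∈ p.2, s ≠ "" := fun s hs => h p (by simp) s hs
    have hbs : ∀ q ∈ bs, ∀ s ∈ q.2, s ≠ "" := fun q hq => h q (by simp [hq])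
    rw [List.foldl_cons, alt_row p.2 hp a b, ih hbs]
    simp only [List.flatMap_cons, List.count_append, Prod.ext_iff]
    constructor <;> push_cast <;> ring

-- ===== VERDICT (by name: the statement is the Claim_ definition above) =====
theorem findNeededInfo_spec : Claim_equal_findNeededInfo := by
  intro board _ hpre
  unfold Spec_findNeededInfo findNeededInfo findNeededInfo_alt
  rw [stringboard_eq board [], alt_fold board hpre 0 0]
  simp [chars_count_singleton]
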